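-- pv_equiv track=rewrite | github.com/dongzooo/Coding-test-with-Py | 구현/오픈채팅방.py | solution
-- ===== SOURCE A (Python) =====
-- def solution(record):
--     answer = []
--     dic = {}
--     tmp = []
--
--     #최종 이름만 알면 된다?
--     for i in record :
--         if i[0] == 'E':
--             el, uid, name = i.split(' ')
--             dic[uid] = name
--         elif i[0] == 'C':
--             el, uid, name = i.split(' ')
--             dic[uid] = name
--         elif i[0] == 'L':
--             continue
--
--     for i in record:
--         if i[0] == 'E':
--             el, uid, name = i.split(' ')
--             answer.append(dic[uid]+'님이 들어왔습니다.')
--         elif i[0] == 'C':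
--             continue
--         elif i[0] == 'L':
--             el, uid = i.split(' ')
--             answer.append(dic[uid]+'님이 나갔습니다.')
--
--
--
--     return answer
-- ===== SOURCE B (Python) =====
-- def solution(record):
--     dic = {}
--     events = []
--     for line in record:
--         c = line[0]
--         if c == 'E':
--             _, uid, name = line.split(' ')
--             dic[uid] = name
--             events.append((uid, True))
--         elif c == 'C':
--             _, uid, name = line.split(' ')
--             dic[uid] = name
--         elif c == 'L':
--             _, uid = line.split(' ')
--             events.append((uid, False))
--     return [dic[uid] + ('님이 들어왔습니다.' if e else '님이 나갔습니다.') for uid, e in events]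
-- ===== Notes on version B (the rewrite author's own statement) =====
-- stated objective: faster
-- what changed: B parses each record line exactly once in a single pass that builds the name dict and a structured (uid, enter?) event list, then renders the messages from the event list, instead of A's two passes that each re-scan and re-split the raw strings.
import Mathlib
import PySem

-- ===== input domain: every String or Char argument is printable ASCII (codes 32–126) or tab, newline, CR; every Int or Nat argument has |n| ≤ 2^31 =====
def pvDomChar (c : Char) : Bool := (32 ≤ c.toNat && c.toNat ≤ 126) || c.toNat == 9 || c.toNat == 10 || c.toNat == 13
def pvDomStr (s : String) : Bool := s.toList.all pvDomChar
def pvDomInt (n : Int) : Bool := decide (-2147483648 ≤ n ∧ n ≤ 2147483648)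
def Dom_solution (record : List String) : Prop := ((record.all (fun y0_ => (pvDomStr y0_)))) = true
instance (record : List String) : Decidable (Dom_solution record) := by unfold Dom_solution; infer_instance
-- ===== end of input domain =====

-- B parses each line once in a single pass building the dict and a structured event list,
-- then renders messages from the events; same return value as A wherever A returns.

-- ===== PORT A =====
-- i.split(' '): sep is " " ≠ "", so Str.split? is always some — getD [] is unreachable
def pvSplitSp (s : String) : List String := (PySem.Str.split? s " ").getD []

-- A's first loop: build dic from E/C lines (L lines 'continue').
def pvAStep1 (dic : PySem.Dict String String) (i : String) : PySem.Dict String String :=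
  match PySem.Str.pyGet? i 0 with
  | some 'E' =>
      match pvSplitSp i with
      | [_, uid, name] => dic.insert uid name
      | _ => dic
  | some 'C' =>
      match pvSplitSp i with
      | [_, uid, name] => dic.insert uid name
      | _ => dic
  | _ => dic

-- A's second loop: append the message for E/L lines ('C' continue).
def pvAStep2 (dic : PySem.Dict String String) (answer : List String) (i : String) : List String :=
  match PySem.Str.pyGet? i 0 with
  | some 'E' =>
      match pvSplitSp i with
      | [_, uid, _] => answer ++ [((dic.get? uid).getD "") ++ "님이 들어왔습니다."]
      | _ => answer
  | some 'C' => answer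
  | some 'L' =>
      match pvSplitSp i with
      | [_, uid] => answer ++ [((dic.get? uid).getD "") ++ "님이 나갔습니다."]
      | _ => answer
  | _ => answer

def solution (record : List String) : List String :=
  let dic := record.foldl pvAStep1 PySem.Dict.empty
  record.foldl (pvAStep2 dic) []

-- ===== PORT B =====
-- B's single pass: split once, maintain (dic, events).
def pvBStep (st : PySem.Dict String String × List (String × Bool)) (line : String) :
    PySem.Dict String String × List (String × Bool) :=
  match PySem.Str.pyGet? line 0 with
  | some 'E' =>
      match pvSplitSp line with
      | [_, uid, name] => (st.1.insert uid name, st.2 ++ [(uid, true)])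
      | _ => st
  | some 'C' =>
      match pvSplitSp line with
      | [_, uid, name] => (st.1.insert uid name, st.2)
      | _ => st
  | some 'L' =>
      match pvSplitSp line with
      | [_, uid] => (st.1, st.2 ++ [(uid, false)])
      | _ => st
  | _ => st

def solution_alt (record : List String) : List String :=
  let st := record.foldl pvBStep (PySem.Dict.empty, [])
  st.2.map (fun e =>
    ((st.1.get? e.1).getD "") ++ (if e.2 then "님이 들어왔습니다." else "님이 나갔습니다."))

-- ===== PRECONDITION & SPEC =====
-- Pre_ excludes exactly the inputs where Python A raises: an empty line (IndexError on i[0]),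
-- an E/C line whose split is not 3 parts or an L line whose split is not 2 parts (ValueError on
-- unpacking), and an L line whose uid never appears in an E/C line (KeyError on dic[uid]).
def Pre_solution (record : List String) : Prop :=
  ∀ s ∈ record, s ≠ "" ∧
    ((PySem.Str.pyGet? s 0 = some 'E' ∨ PySem.Str.pyGet? s 0 = some 'C') →
        (pvSplitSp s).length = 3) ∧
    (PySem.Str.pyGet? s 0 = some 'L' →
        (pvSplitSp s).length = 2 ∧
        ∃ t ∈ record,
          (PySem.Str.pyGet? t 0 = some 'E' ∨ PySem.Str.pyGet? t 0 = some 'C') ∧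
          (pvSplitSp t).length = 3 ∧
          (pvSplitSp t)[1]? = (pvSplitSp s)[1]?)
instance (record : List String) : Decidable (Pre_solution record) := by
  unfold Pre_solution; infer_instance
def pvWitness_solution : List String := ["E 1 bob", "L 2", "C 1 sam", "E 2 max", "L 1"]
def Spec_solution (record : List String) (out : List String) : Prop := out = solution_alt record
instance (record : List String) (out : List String) : Decidable (Spec_solution record out) := by unfold Spec_solution; infer_instance

-- ===== CLAIM (what is proved, stated in full; the proofs are below) =====
def Claim_equal_solution : Prop := ∀ (record : List String), Dom_solution record → Pre_solution record → Spec_solution record (solution record)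

-- ===== LEMMAS AND PROOFS =====

-- one line's contribution to B's event list
def pvEv1 (i : String) : List (String × Bool) :=
  match PySem.Str.pyGet? i 0 with
  | some 'E' =>
      match pvSplitSp i with
      | [_, uid, _] => [(uid, true)]
      | _ => []
  | some 'L' =>
      match pvSplitSp i with
      | [_, uid] => [(uid, false)]
      | _ => []
  | _ => []

-- B's fold = (A's dic fold, accumulated events)
lemma pvBStep_decomp (rec : List String) (d : PySem.Dict String String)
    (ev : List (String × Bool)) :
    rec.foldl pvBStep (d, ev) = (rec.foldl pvAStep1 d, ev ++ rec.flatMap pvEv1) := by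
  induction rec generalizing d ev with
  | nil => simp
  | cons x xs ih =>
    simp only [List.foldl_cons, List.flatMap_cons]
    rw [ih]
    have hst : pvBStep (d, ev) x = (pvAStep1 d x, ev ++ pvEv1 x) := by
      unfold pvBStep pvAStep1 pvEv1
      cases h : PySem.Str.pyGet? x 0 with
      | none => simp
      | some c =>
        by_cases hE : c = 'E'
        · subst hE; cases hs : pvSplitSp x with
          | nil => simp
          | cons a t => cases t with
            | nil => simp
            | cons b t2 => cases t2 with
              | nil => simp
              | cons c3 t3 => cases t3 <;> simp
        · by_cases hC : c = 'C'
          · subst hC; cases hs : pvSplitSp x with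
            | nil => simp
            | cons a t => cases t with
              | nil => simp
              | cons b t2 => cases t2 with
                | nil => simp
                | cons c3 t3 => cases t3 <;> simp [hE]
          · by_cases hL : c = 'L'
            · subst hL; cases hs : pvSplitSp x with
              | nil => simp [hE, hC]
              | cons a t => cases t with
                | nil => simp [hE, hC]
                | cons b t2 => cases t2 <;> simp [hE, hC]
            · simp [hE, hC, hL]
    rw [hst, List.append_assoc]

-- A's second loop renders exactly the events of each line
lemma pvAStep2_ev (d : PySem.Dict String String) (acc : List String) (i : String) :
    pvAStep2 d acc i = acc ++ (pvEv1 i).map (fun e =>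
      ((d.get? e.1).getD "") ++ (if e.2 then "님이 들어왔습니다." else "님이 나갔습니다.")) := by
  unfold pvAStep2 pvEv1
  cases h : PySem.Str.pyGet? i 0 with
  | none => simp
  | some c =>
    by_cases hE : c = 'E'
    · subst hE; cases hs : pvSplitSp i with
      | nil => simp
      | cons a t => cases t with
        | nil => simp
        | cons b t2 => cases t2 with
          | nil => simp
          | cons c3 t3 => cases t3 <;> simp
    · by_cases hC : c = 'C'
      · subst hC; simp [hE]
      · by_cases hL : c = 'L'
        · subst hL; cases hs : pvSplitSp i with
          | nil => simp
          | cons a t => cases t with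
            | nil => simp
            | cons b t2 => cases t2 <;> simp
        · simp [hE, hC, hL]

lemma pvFoldA2 (d : PySem.Dict String String) (rec : List String) (acc : List String) :
    rec.foldl (pvAStep2 d) acc = acc ++ (rec.flatMap pvEv1).map (fun e =>
      ((d.get? e.1).getD "") ++ (if e.2 then "님이 들어왔습니다." else "님이 나갔습니다.")) := by
  induction rec generalizing acc with
  | nil => simp
  | cons x xs ih =>
    simp only [List.foldl_cons, List.flatMap_cons, List.map_append]
    rw [pvAStep2_ev, ih, List.append_assoc]

-- ===== VERDICT (by name: the statement is the Claim_ definition above) =====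
theorem solution_spec : Claim_equal_solution := by
  intro record _ _
  show solution record = solution_alt record
  unfold solution solution_alt
  rw [pvBStep_decomp, pvFoldA2]
  simp
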